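-- pv_equiv track=rewrite | github.com/WenXiangWu/code-ast-graph | src/parsers/java/scanner.py | _extract_visibility
-- ===== SOURCE A (Python) =====
-- from typing import Optional, Dict, List, Tuple
--
-- def _extract_visibility(modifiers: List[str]) -> str:
--     """提取可见性"""
--     modifier_strs = [str(m) for m in modifiers]
--     if "public" in modifier_strs:
--         return "PUBLIC"
--     elif "protected" in modifier_strs:
--         return "PROTECTED"
--     elif "private" in modifier_strs:
--         return "PRIVATE"
--     else:
--         return "PACKAGE"
-- ===== SOURCE B (Python) =====
-- def _extract_visibility(modifiers):
--     """提取可见性 — single table-driven pass keeping the smallest priority."""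
--     priority = {"public": 0, "protected": 1, "private": 2}
--     labels = ["PUBLIC", "PROTECTED", "PRIVATE", "PACKAGE"]
--     best = 3
--     for m in modifiers:
--         p = priority.get(str(m))
--         if p is not None and p < best:
--             best = p
--     return labels[best]
-- ===== Notes on version B (the rewrite author's own statement) =====
-- stated objective: alternative
-- what changed: Replaced three sequential membership scans with one table-driven pass that tracks the minimum visibility priority and maps it to a label at the end.
import Mathlib
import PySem

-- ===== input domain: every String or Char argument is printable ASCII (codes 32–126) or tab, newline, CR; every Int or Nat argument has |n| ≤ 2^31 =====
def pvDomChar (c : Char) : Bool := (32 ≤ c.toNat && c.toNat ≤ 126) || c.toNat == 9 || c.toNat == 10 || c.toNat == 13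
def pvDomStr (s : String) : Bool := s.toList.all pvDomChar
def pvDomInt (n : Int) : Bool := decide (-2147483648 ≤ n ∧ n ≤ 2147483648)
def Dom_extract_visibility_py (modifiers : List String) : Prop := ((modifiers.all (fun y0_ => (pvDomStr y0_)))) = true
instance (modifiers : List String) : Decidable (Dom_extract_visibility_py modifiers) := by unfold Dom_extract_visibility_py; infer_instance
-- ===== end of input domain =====

-- B replaces A's three sequential membership scans with one table-driven pass
-- that keeps the smallest visibility priority (objective: alternative, same cost).

-- ===== PORT A =====
-- Python: modifier_strs = [str(m) for m in modifiers]; then three `in` checks in order.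
def extract_visibility_py (modifiers : List String) : String :=
  let modifier_strs := modifiers.map (fun m => m)  -- str(m) on a str is the identity
  if "public" ∈ modifier_strs then "PUBLIC"
  else if "protected" ∈ modifier_strs then "PROTECTED"
  else if "private" ∈ modifier_strs then "PRIVATE"
  else "PACKAGE"

-- ===== PORT B =====
-- priority.get(str(m)) from Source B's table
def pvPriGet (m : String) : Option Nat :=
  if m = "public" then some 0
  else if m = "protected" then some 1
  else if m = "private" then some 2
  else none

-- loop body: if p is not None and p < best then best = p
def pvStep (best : Nat) (m : String) : Nat :=
  match pvPriGet m with
  | some p => if p < best then p else best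
  | none => best

def extract_visibility_py_alt (modifiers : List String) : String :=
  let best := modifiers.foldl pvStep 3
  ["PUBLIC", "PROTECTED", "PRIVATE", "PACKAGE"].getD best ""

-- ===== PRECONDITION & SPEC =====
def Spec_extract_visibility_py (modifiers : List String) (out : String) : Prop := out = extract_visibility_py_alt modifiers
instance (modifiers : List String) (out : String) : Decidable (Spec_extract_visibility_py modifiers out) := by unfold Spec_extract_visibility_py; infer_instance

-- ===== CLAIM (what is proved, stated in full; the proofs are below) =====
def Claim_equal_extract_visibility_py : Prop := ∀ (modifiers : List String), Dom_extract_visibility_py modifiers → Spec_extract_visibility_py modifiers (extract_visibility_py modifiers)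

-- ===== LEMMAS AND PROOFS =====

-- the A-style rank of a list: position of the strongest keyword present, 3 if none
def pvRank (l : List String) : Nat :=
  if "public" ∈ l then 0
  else if "protected" ∈ l then 1
  else if "private" ∈ l then 2
  else 3

lemma pvRank_le (l : List String) : pvRank l ≤ 3 := by
  unfold pvRank; split_ifs <;> omega

lemma pvRank_cons (m : String) (l : List String) :
    pvRank (m :: l) = min (pvStep 3 m) (pvRank l) := by
  unfold pvRank pvStep pvPriGet
  by_cases h1 : m = "public" <;> by_cases h2 : m = "protected" <;>
    by_cases h3 : m = "private" <;>
    simp [h1, h2, h3, List.mem_cons] <;> split_ifs <;> simp_all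

lemma pvFold_eq (l : List String) : ∀ b, b ≤ 3 →
    List.foldl pvStep b l = min b (pvRank l) := by
  induction l with
  | nil => intro b hb; simp [pvRank]; omega
  | cons m t ih =>
    intro b hb
    have hstep : pvStep b m = min b (pvStep 3 m) := by
      by_cases h1 : m = "public" <;> by_cases h2 : m = "protected" <;>
        by_cases h3 : m = "private" <;> simp [pvStep, pvPriGet, h1, h2, h3, Nat.min_def] <;> (try split_ifs) <;> omega
    have h3 : pvStep b m ≤ 3 := by rw [hstep]; omega
    have h3' : min b (pvStep 3 m) ≤ 3 := by omega
    rw [List.foldl_cons, hstep, ih _ h3', pvRank_cons]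
    exact Nat.min_assoc _ _ _

theorem extract_visibility_py_spec : Claim_equal_extract_visibility_py := by
  intro modifiers _
  unfold Spec_extract_visibility_py extract_visibility_py extract_visibility_py_alt
  have h := pvFold_eq modifiers 3 (le_refl 3)
  have hr := pvRank_le modifiers
  rw [h]
  have : min 3 (pvRank modifiers) = pvRank modifiers := by omega
  rw [this]
  unfold pvRank
  simp only [List.map_id']
  split_ifs <;> rfl
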